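-- pv_equiv track=rewrite | github.com/tohsin/Data-structuturess-and-Algorithms | foo bar/braille.py | solution
-- ===== SOURCE A (Python) =====
-- def solution(s):
--     mem={ "a":	1,
--         'b'	:	12,
--         'c'	:	14,
--         'd'	:	145,
--         'e'	:	15,
--         'f'	:	124,
--         'g'	:	1245,
--         'h'	:	125,
--         'i'	:	24,
--         'j'	:	245,
--         'k'	:	13,
--         'l'	:	123,
--         'm'	:	134,
--         'n'	:	1345,
--         'o'	:	135,
--         'p'	:	1234,
--         'q'	:	12345,
--         'r'	:	1235,
--         's'	:	234,
--         't'	:	2345,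
--         'u'	:	136,
--         'v'	:	1236,
--         'w'	:	2456,
--         'x'	:	1346,
--         'y'	:	13456,
--         'z'	:	1356 ,
--         }
--
--
--     cache=[0,0,0,0,0,0]
--     answer=""
--     for i in range(len(s)):
--         if s[i]==" ":
--             answer+="000000"
--             continue
--         if s[i].isupper():
--             answer+="000001"
--
--         for j in range(len(str(mem[s[i].lower()]))):
--             cache[int(str(mem[s[i].lower()])[j])-1]=1
--         x="".join(str(n) for n in cache)
--         answer+=x
--         cache=[0,0,0,0,0,0]
--     return answer
-- ===== SOURCE B (Python) =====
-- BRAILLE = {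
--     ' ': '000000',
--     'a': '100000', 'b': '110000', 'c': '100100', 'd': '100110', 'e': '100010',
--     'f': '110100', 'g': '110110', 'h': '110010', 'i': '010100', 'j': '010110',
--     'k': '101000', 'l': '111000', 'm': '101100', 'n': '101110', 'o': '101010',
--     'p': '111100', 'q': '111110', 'r': '111010', 's': '011100', 't': '011110',
--     'u': '101001', 'v': '111001', 'w': '010111', 'x': '101101', 'y': '101111',
--     'z': '101011',
-- }
--
-- def solution(s):
--     out = []
--     for ch in s:
--         if ch != ' ' and ch.isupper():
--             out.append('000001')
--         out.append(BRAILLE[ch if ch == ' ' else ch.lower()])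
--     return ''.join(out)
-- ===== Notes on version B (the rewrite author's own statement) =====
-- stated objective: simpler
-- what changed: B replaces A's int-coded dict plus the per-character 6-slot cache array and inner digit-decoding loop by a dict mapping each character (including space) directly to its 6-bit braille string, collecting chunks in a list joined once at the end.
import Mathlib
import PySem

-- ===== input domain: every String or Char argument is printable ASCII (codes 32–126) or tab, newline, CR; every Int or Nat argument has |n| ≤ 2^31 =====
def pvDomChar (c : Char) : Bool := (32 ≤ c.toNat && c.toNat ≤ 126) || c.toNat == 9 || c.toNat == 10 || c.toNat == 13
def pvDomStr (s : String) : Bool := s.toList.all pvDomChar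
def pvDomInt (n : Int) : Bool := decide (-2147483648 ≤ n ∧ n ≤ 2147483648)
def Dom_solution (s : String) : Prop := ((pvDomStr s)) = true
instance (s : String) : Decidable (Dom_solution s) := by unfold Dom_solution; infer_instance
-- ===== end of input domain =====

-- B replaces A's int-coded dict + per-letter cache/digit loop by a dict mapping each
-- character directly to its 6-bit braille string (objective: simpler).

-- ===== PORT A =====
def memA : PySem.Dict Char Int := PySem.Dict.ofList
  [('a', 1), ('b', 12), ('c', 14), ('d', 145), ('e', 15), ('f', 124), ('g', 1245),
   ('h', 125), ('i', 24), ('j', 245), ('k', 13), ('l', 123), ('m', 134), ('n', 1345),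
   ('o', 135), ('p', 1234), ('q', 12345), ('r', 1235), ('s', 234), ('t', 2345),
   ('u', 136), ('v', 1236), ('w', 2456), ('x', 1346), ('y', 13456), ('z', 1356)]

-- for j in range(len(str(mem[..]))): cache[int(str(mem[..])[j])-1] = 1
def fillCacheA (digits : List Char) (cache : List Int) : List Int :=
  digits.foldl (fun cc d => PySem.List.pySetD cc ((PySem.Int.ofChars? [d]).getD 0 - 1) 1) cache

-- one iteration of A's `for i in range(len(s))` body (over the character s[i])
def stepA (answer : List Char) (c : Char) : List Char :=
  if c = ' ' then answer ++ ("000000".toList)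
  else
    let answer := if PySem.Chars.isupper c then answer ++ ("000001".toList) else answer
    match memA.get? (PySem.Chars.lowerChar c) with
    | none => answer   -- Python raises KeyError here; excluded by Pre_solution
    | some v =>
      let cache := fillCacheA (PySem.Int.toChars v) [0, 0, 0, 0, 0, 0]
      answer ++ PySem.Chars.join [] (cache.map PySem.Int.toChars)

def solution (s : String) : String :=
  String.ofList (s.toList.foldl stepA [])

-- ===== PORT B =====
def brailleB : PySem.Dict Char (List Char) := PySem.Dict.ofList
  [(' ', "000000".toList),
   ('a', "100000".toList), ('b', "110000".toList), ('c', "100100".toList),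
   ('d', "100110".toList), ('e', "100010".toList), ('f', "110100".toList),
   ('g', "110110".toList), ('h', "110010".toList), ('i', "010100".toList),
   ('j', "010110".toList), ('k', "101000".toList), ('l', "111000".toList),
   ('m', "101100".toList), ('n', "101110".toList), ('o', "101010".toList),
   ('p', "111100".toList), ('q', "111110".toList), ('r', "111010".toList),
   ('s', "011100".toList), ('t', "011110".toList), ('u', "101001".toList),
   ('v', "111001".toList), ('w', "010111".toList), ('x', "101101".toList),
   ('y', "101111".toList), ('z', "101011".toList)]

-- one iteration of B's loop: appends chunks to the `out` list of strings
def stepB (out : List (List Char)) (c : Char) : List (List Char) :=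
  let out := if c ≠ ' ' ∧ PySem.Chars.isupper c then out ++ ["000001".toList] else out
  match brailleB.get? (if c = ' ' then c else PySem.Chars.lowerChar c) with
  | none => out   -- Python raises KeyError here; excluded by Pre_solution
  | some t => out ++ [t]

def solution_alt (s : String) : String :=
  String.ofList (PySem.Chars.join [] (s.toList.foldl stepB []))

-- ===== PRECONDITION & SPEC =====
def allowedChars : List Char :=
  [' ', 'a','b','c','d','e','f','g','h','i','j','k','l','m','n','o','p','q','r','s','t','u','v','w','x','y','z',
   'A','B','C','D','E','F','G','H','I','J','K','L','M','N','O','P','Q','R','S','T','U','V','W','X','Y','Z']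

-- Pre_ excludes exactly the inputs on which the Python A raises KeyError:
-- strings containing a character that is neither a space nor an ASCII letter.
def Pre_solution (s : String) : Prop :=
  (s.toList.all (fun c => allowedChars.contains c)) = true
instance (s : String) : Decidable (Pre_solution s) := by unfold Pre_solution; infer_instance

def pvWitness_solution : String := "Hi"

def Spec_solution (s : String) (out : String) : Prop := out = solution_alt s
instance (s : String) (out : String) : Decidable (Spec_solution s out) := by unfold Spec_solution; infer_instance

-- ===== CLAIM (what is proved, stated in full; the proofs are below) =====
def Claim_equal_solution : Prop := ∀ (s : String), Dom_solution s → Pre_solution s → Spec_solution s (solution s)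

-- ===== LEMMAS AND PROOFS =====

theorem stepA_shift (acc : List Char) (c : Char) : stepA acc c = acc ++ stepA [] c := by
  unfold stepA
  split_ifs with h1 h2 <;> cases hm : memA.get? (PySem.Chars.lowerChar c) <;> simp

theorem stepB_shift (acc : List (List Char)) (c : Char) : stepB acc c = acc ++ stepB [] c := by
  unfold stepB
  split_ifs with h1 h2 <;> cases hm : brailleB.get? c <;> cases hm' : brailleB.get? (PySem.Chars.lowerChar c) <;> simp

theorem foldA_shift (l : List Char) : ∀ acc, l.foldl stepA acc = acc ++ l.foldl stepA [] := by
  induction l with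
  | nil => simp
  | cons c t ih =>
    intro acc
    simp only [List.foldl_cons]
    rw [ih (stepA acc c), ih (stepA [] c), stepA_shift acc c, List.append_assoc]

theorem foldB_shift (l : List Char) : ∀ acc, l.foldl stepB acc = acc ++ l.foldl stepB [] := by
  induction l with
  | nil => simp
  | cons c t ih =>
    intro acc
    simp only [List.foldl_cons]
    rw [ih (stepB acc c), ih (stepB [] c), stepB_shift acc c, List.append_assoc]

theorem joinNil_flatten (xs : List (List Char)) : PySem.Chars.join [] xs = xs.flatten := by
  induction xs with
  | nil => rfl
  | cons a t ih => cases t <;> simp_all [PySem.Chars.join, List.intercalate]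

theorem per_char :
    ∀ c ∈ allowedChars, stepA [] c = PySem.Chars.join [] (stepB [] c) := by
  intro c hc
  fin_cases hc <;> decide

theorem fold_eq (l : List Char)
    (h : ∀ c ∈ l, c ∈ allowedChars) :
    l.foldl stepA [] = PySem.Chars.join [] (l.foldl stepB []) := by
  induction l with
  | nil => rfl
  | cons c t ih =>
    simp only [List.foldl_cons]
    rw [foldA_shift, foldB_shift]
    simp only [joinNil_flatten, List.flatten_append]
    have hc := per_char c (h c (by simp))
    rw [joinNil_flatten] at hc
    rw [hc, ih (fun x hx => h x (by simp [hx]))]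
    simp [joinNil_flatten]

-- ===== VERDICT (by name: the statement is the Claim_ definition above) =====
theorem solution_spec : Claim_equal_solution := by
  intro s _ hpre
  unfold Pre_solution at hpre
  simp only [List.all_eq_true, List.contains_iff_mem] at hpre
  unfold Spec_solution solution solution_alt
  exact congrArg String.ofList (fold_eq s.toList hpre)
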